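-- pv_equiv track=rewrite | github.com/martinfaucheux/advent-of-code | 2023/10/run.py | fill_holes
-- ===== SOURCE A (Python) =====
-- from collections import deque
--
-- def is_valid_pos(table, pos):
--     row, col = pos
--     return 0 <= row < len(table) and 0 <= col < len(table[row])
--
-- def fill_holes(grid, start_pos=None, filler="O"):
--     if start_pos is None:
--         start_pos = (len(grid) // 2, len(grid[0]) // 2)
--
--     filled_pos = propagate(grid, start_pos)
--
--     return [
--         "".join(
--             filler if (row, col) in filled_pos else elt for col, elt in enumerate(line)
--         )
--         for row, line in enumerate(grid)
--     ]
--
-- def propagate(grid, start_pos):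
--     x, y = start_pos
--     assert grid[x][y] == ".", "start point must be empty"
--
--     visited = set(start_pos)
--     queue = deque([start_pos])
--
--     while queue:
--         pos = queue.pop()
--         visited.add(pos)
--
--         for dir in [(0, 1), (1, 0), (0, -1), (-1, 0)]:
--             next_pos = (pos[0] + dir[0], pos[1] + dir[1])
--             x, y = next_pos
--             if (
--                 (not is_valid_pos(grid, next_pos))
--                 or (next_pos in visited)
--                 or grid[x][y] != "."
--             ):
--                 continue
--             queue.append(next_pos)
--     return visited
-- ===== SOURCE B (Python) =====
-- def fill_holes(grid, start_pos=None, filler="O"):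
--     if start_pos is None:
--         start_pos = (len(grid) // 2, len(grid[0]) // 2)
--     r0, c0 = start_pos
--     assert grid[r0][c0] == ".", "start point must be empty"
--
--     def is_open(pos):
--         r, c = pos
--         return 0 <= r < len(grid) and 0 <= c < len(grid[r]) and grid[r][c] == "."
--
--     visited = {start_pos}
--     frontier = {start_pos}
--     while frontier:
--         next_frontier = {
--             (r + dr, c + dc)
--             for r, c in frontier
--             for dr, dc in ((0, 1), (1, 0), (0, -1), (-1, 0))
--         }
--         next_frontier = {p for p in next_frontier if is_open(p) and p not in visited}
--         visited |= next_frontier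
--         frontier = next_frontier
--
--     return [
--         "".join(filler if (row, col) in visited else elt for col, elt in enumerate(line))
--         for row, line in enumerate(grid)
--     ]
-- ===== Notes on version B (the rewrite author's own statement) =====
-- stated objective: alternative
-- what changed: propagate's pop-one-cell deque/stack loop (DFS order, with possible duplicate queue entries) is replaced by a layer-synchronous BFS that expands the whole frontier set each round and unions it into visited; the render step is unchanged.
import Mathlib
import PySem

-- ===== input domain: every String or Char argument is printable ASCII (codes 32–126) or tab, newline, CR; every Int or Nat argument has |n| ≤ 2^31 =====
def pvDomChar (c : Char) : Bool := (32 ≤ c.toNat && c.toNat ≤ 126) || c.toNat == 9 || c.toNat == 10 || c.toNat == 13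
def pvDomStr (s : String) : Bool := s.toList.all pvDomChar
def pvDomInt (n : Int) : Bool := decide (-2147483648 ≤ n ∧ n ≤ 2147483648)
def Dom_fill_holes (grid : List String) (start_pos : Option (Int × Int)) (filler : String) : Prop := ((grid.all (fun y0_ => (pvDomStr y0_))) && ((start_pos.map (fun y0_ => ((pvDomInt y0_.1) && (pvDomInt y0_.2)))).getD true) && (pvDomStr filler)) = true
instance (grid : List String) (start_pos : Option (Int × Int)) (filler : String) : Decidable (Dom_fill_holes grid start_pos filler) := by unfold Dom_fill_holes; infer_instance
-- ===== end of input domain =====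

-- B replaces A's pop-one-cell stack (deque) flood fill by a layer-synchronous BFS over whole
-- frontier sets (objective: alternative decomposition, same asymptotic cost; render step unchanged).

-- shared small helpers (the four directions; the list of in-bounds cells, used only as a fuel bound)
def pvDirs : List (Int × Int) := [(0, 1), (1, 0), (0, -1), (-1, 0)]

def pvCellsList (grid : List String) : List (Int × Int) :=
  (List.range grid.length).flatMap
    (fun r => (List.range (grid.getD r "").toList.length).map (fun c => ((r : Int), (c : Int))))

-- grid[x][y] as Python computes it (none = IndexError)
def pvCellA (grid : List String) (p : Int × Int) : Option Char :=
  (PySem.List.pyGet? grid p.1).bind (fun line => PySem.Str.pyGet? line p.2)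

-- ===== PORT A =====
def is_valid_pos (table : List String) (pos : Int × Int) : Bool :=
  decide (0 ≤ pos.1) && decide (pos.1 < PySem.List.len table) &&
    (decide (0 ≤ pos.2) && decide (pos.2 < PySem.Str.len ((PySem.List.pyGet? table pos.1).getD "")))

-- the body of A's `for dir in …` loop: skip (continue) or append to the deque's right (= cons)
def pvPush (grid : List String) (visited : PySem.Set (Int × Int)) (pos : Int × Int)
    (q : List (Int × Int)) (d : Int × Int) : List (Int × Int) :=
  let np := (pos.1 + d.1, pos.2 + d.2)
  if !is_valid_pos grid np || PySem.Set.contains visited np || !(pvCellA grid np == some '.') then q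
  else np :: q

-- A's `while queue` loop; the list head is the deque's RIGHT end (pop side).  The fuel only
-- makes the recursion total; `propagateLoop_spec` below shows it is never exhausted.
def propagateLoop (grid : List String) : Nat → PySem.Set (Int × Int) → List (Int × Int) → PySem.Set (Int × Int)
  | 0, visited, _ => visited
  | _ + 1, visited, [] => visited
  | fuel + 1, visited, pos :: queue =>
      let visited' := PySem.Set.add visited pos
      propagateLoop grid fuel visited' (pvDirs.foldl (pvPush grid visited' pos) queue)

-- Python's `visited = set(start_pos)` is a set of the two integer COORDINATES; integers never
-- equal a pair, so as a set of pairs it is empty.  The assert is Pre_fill_holes.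
def propagate (grid : List String) (start_pos : Int × Int) : PySem.Set (Int × Int) :=
  propagateLoop grid (5 + 4 * (pvCellsList grid).length) PySem.Set.empty [start_pos]

def pvRenderRowA (filler : String) (filled : PySem.Set (Int × Int)) (row : Int) (line : String) : String :=
  PySem.Str.join "" ((PySem.List.enumerate line.toList 0).map
    (fun ce => if PySem.Set.contains filled (row, ce.1) then filler else String.ofList [ce.2]))

def fill_holes (grid : List String) (start_pos : Option (Int × Int)) (filler : String) : List String :=
  let s := match start_pos with
    | none => (PySem.Int.floordiv (PySem.List.len grid) 2,
               PySem.Int.floordiv (PySem.Str.len ((PySem.List.pyGet? grid 0).getD "")) 2)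
    | some p => p
  let filled_pos := propagate grid s
  (PySem.List.enumerate grid 0).map (fun rl => pvRenderRowA filler filled_pos rl.1 rl.2)

-- ===== PORT B =====
-- B's is_open: in bounds and the cell is '.'
def pvIsOpen (grid : List String) (p : Int × Int) : Bool :=
  decide (0 ≤ p.1) && decide (p.1 < PySem.List.len grid) &&
    (match PySem.List.pyGet? grid p.1 with
     | some line => decide (0 ≤ p.2) && decide (p.2 < PySem.Str.len line) && (PySem.Str.pyGet? line p.2 == some '.')
     | none => false)

-- {(r+dr, c+dc) for (r,c) in frontier for (dr,dc) in dirs} (a set: order-insensitive)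
def pvNeighborsB (frontier : PySem.Set (Int × Int)) : PySem.Set (Int × Int) :=
  frontier.foldl (fun s p => pvDirs.foldl (fun s d => PySem.Set.add s (p.1 + d.1, p.2 + d.2)) s)
    PySem.Set.empty

-- B's `while frontier` loop (fuel only for totality; shown sufficient in bfsLoop_spec below)
def bfsLoop (grid : List String) : Nat → PySem.Set (Int × Int) → PySem.Set (Int × Int) → PySem.Set (Int × Int)
  | 0, visited, _ => visited
  | fuel + 1, visited, frontier =>
      if frontier.isEmpty then visited
      else
        let next := (pvNeighborsB frontier).filter
          (fun p => pvIsOpen grid p && !(PySem.Set.contains visited p))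
        bfsLoop grid fuel (PySem.Set.union visited next) next

def pvRenderRowB (filler : String) (visited : PySem.Set (Int × Int)) (row : Int) (line : String) : String :=
  PySem.Str.join "" ((PySem.List.enumerate line.toList 0).map
    (fun ce => if PySem.Set.contains visited (row, ce.1) then filler else String.ofList [ce.2]))

def fill_holes_alt (grid : List String) (start_pos : Option (Int × Int)) (filler : String) : List String :=
  let s := match start_pos with
    | none => (PySem.Int.floordiv (PySem.List.len grid) 2,
               PySem.Int.floordiv (PySem.Str.len ((PySem.List.pyGet? grid 0).getD "")) 2)
    | some p => p
  let visited := bfsLoop grid (2 + (pvCellsList grid).length)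
      (PySem.Set.add PySem.Set.empty s) (PySem.Set.add PySem.Set.empty s)
  (PySem.List.enumerate grid 0).map (fun rl => pvRenderRowB filler visited rl.1 rl.2)

-- ===== PRECONDITION & SPEC =====
-- Pre_ = exactly where A returns: grid[x][y] (Python indexing, so possibly negative x/y) exists
-- and is '.', with the default start (len(grid)//2, len(grid[0])//2) needing grid[0] to exist.
def Pre_fill_holes (grid : List String) (start_pos : Option (Int × Int)) (filler : String) : Prop :=
  pvCellA grid (start_pos.getD
    (PySem.Int.floordiv (PySem.List.len grid) 2,
     PySem.Int.floordiv (PySem.Str.len ((PySem.List.pyGet? grid 0).getD "")) 2)) = some '.'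
instance (grid : List String) (start_pos : Option (Int × Int)) (filler : String) : Decidable (Pre_fill_holes grid start_pos filler) := by unfold Pre_fill_holes; infer_instance

def pvWitness_fill_holes : List String × (Option (Int × Int)) × String := (["..", ".#"], some (0, 0), "O")

def Spec_fill_holes (grid : List String) (start_pos : Option (Int × Int)) (filler : String) (out : List String) : Prop := out = fill_holes_alt grid start_pos filler
instance (grid : List String) (start_pos : Option (Int × Int)) (filler : String) (out : List String) : Decidable (Spec_fill_holes grid start_pos filler out) := by unfold Spec_fill_holes; infer_instance

-- ===== CLAIM (what is proved, stated in full; the proofs are below) =====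
def Claim_equal_fill_holes : Prop := ∀ (grid : List String) (start_pos : Option (Int × Int)) (filler : String), Dom_fill_holes grid start_pos filler → Pre_fill_holes grid start_pos filler → Spec_fill_holes grid start_pos filler (fill_holes grid start_pos filler)

-- ===== LEMMAS AND PROOFS =====

-- the flood-fill step relation and reachability
def pvGood (grid : List String) (p : Int × Int) : Prop :=
  is_valid_pos grid p = true ∧ pvCellA grid p = some '.'

def pvAdj (a b : Int × Int) : Prop := ∃ d ∈ pvDirs, b = (a.1 + d.1, a.2 + d.2)

def pvStep (grid : List String) (a b : Int × Int) : Prop := pvAdj a b ∧ pvGood grid b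

def pvReach (grid : List String) (s q : Int × Int) : Prop := Relation.ReflTransGen (pvStep grid) s q

lemma mem_pvCellsList {grid : List String} {p : Int × Int} :
    p ∈ pvCellsList grid ↔ is_valid_pos grid p = true := by
  simp [pvCellsList, is_valid_pos, PySem.List.len, PySem.Str.len_eq]
  constructor
  · rintro ⟨r, hr, c, hc, rfl⟩
    simp [List.getElem?_eq_getElem hr] at hc
    refine ⟨⟨?_, ?_⟩, ?_, ?_⟩ <;> simp [PySem.List.pyGet?_natCast, hr, hc]
  · rintro ⟨⟨h1, h2⟩, h3, h4⟩
    rw [PySem.List.pyGet?_of_nonneg _ h1] at h4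
    refine ⟨p.1.toNat, by omega, p.2.toNat, by omega, ?_⟩
    rw [Prod.ext_iff]
    constructor <;> simp <;> omega

lemma pvIsOpen_iff {grid : List String} {p : Int × Int} :
    pvIsOpen grid p = true ↔ pvGood grid p := by
  unfold pvIsOpen pvGood is_valid_pos pvCellA
  cases h : PySem.List.pyGet? grid p.1 with
  | none => simp [h]
  | some line =>
    simp only [h, Option.getD_some, Option.bind, Bool.and_eq_true, decide_eq_true_eq,
      beq_iff_eq]
    tauto

lemma pvPush_pos {grid : List String} {V : PySem.Set (Int × Int)} {p d : Int × Int}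
    {q : List (Int × Int)} (hg : pvGood grid (p.1 + d.1, p.2 + d.2))
    (hm : (p.1 + d.1, p.2 + d.2) ∉ V) :
    pvPush grid V p q d = (p.1 + d.1, p.2 + d.2) :: q := by
  unfold pvPush
  rw [if_neg]
  simp only [Bool.or_eq_true, Bool.not_eq_true', beq_iff_eq, not_or, Bool.not_eq_false]
  refine ⟨⟨hg.1, ?_⟩, by simp [hg.2]⟩
  simp only [Bool.not_eq_true]
  rw [← Bool.not_eq_true]
  intro hcon
  exact hm ((PySem.Set.contains_iff _ _).mp hcon)

lemma pvPush_neg {grid : List String} {V : PySem.Set (Int × Int)} {p d : Int × Int}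
    {q : List (Int × Int)} (h : ¬(pvGood grid (p.1 + d.1, p.2 + d.2) ∧ (p.1 + d.1, p.2 + d.2) ∉ V)) :
    pvPush grid V p q d = q := by
  unfold pvPush
  rw [if_pos]
  by_cases hv : is_valid_pos grid (p.1 + d.1, p.2 + d.2) = true
  · by_cases hcell : pvCellA grid (p.1 + d.1, p.2 + d.2) = some '.'
    · have hm : (p.1 + d.1, p.2 + d.2) ∈ V := by
        by_contra hmm; exact h ⟨⟨hv, hcell⟩, hmm⟩
      simp [hm]
    · simp [hcell]
  · simp [hv]

lemma foldl_pvPush_exists' (grid : List String) (V : PySem.Set (Int × Int)) (p : Int × Int) :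
    ∀ (ds : List (Int × Int)) (q : List (Int × Int)), ∃ P : List (Int × Int),
      ds.foldl (pvPush grid V p) q = P ++ q ∧
      (∀ x, x ∈ P ↔ ∃ d ∈ ds, x = (p.1 + d.1, p.2 + d.2) ∧ pvGood grid x ∧ x ∉ V) ∧
      P.length ≤ ds.length := by
  intro ds
  induction ds with
  | nil => intro q; exact ⟨[], rfl, by simp, by simp⟩
  | cons d ds ih =>
    intro q
    by_cases hc : pvGood grid (p.1 + d.1, p.2 + d.2) ∧ (p.1 + d.1, p.2 + d.2) ∉ V
    · obtain ⟨P, hP1, hP2, hP3⟩ := ih ((p.1 + d.1, p.2 + d.2) :: q)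
      refine ⟨P ++ [(p.1 + d.1, p.2 + d.2)], ?_, ?_, ?_⟩
      · rw [List.foldl_cons, pvPush_pos hc.1 hc.2, hP1, List.append_assoc]
        rfl
      · intro x
        constructor
        · intro hx
          rcases List.mem_append.mp hx with hx | hx
          · obtain ⟨e, he, hxe, hg, hv⟩ := (hP2 x).mp hx
            exact ⟨e, List.mem_cons_of_mem _ he, hxe, hg, hv⟩
          · have hxeq : x = (p.1 + d.1, p.2 + d.2) := by simpa using hx
            exact ⟨d, List.mem_cons_self, hxeq, hxeq ▸ hc.1, hxeq ▸ hc.2⟩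
        · rintro ⟨e, he, hxe, hg, hv⟩
          rcases List.mem_cons.mp he with rfl | he'
          · exact List.mem_append.mpr (Or.inr (by simp [hxe]))
          · exact List.mem_append.mpr (Or.inl ((hP2 x).mpr ⟨e, he', hxe, hg, hv⟩))
      · simp only [List.length_append, List.length_cons, List.length_nil]
        omega
    · obtain ⟨P, hP1, hP2, hP3⟩ := ih q
      refine ⟨P, ?_, ?_, ?_⟩
      · rw [List.foldl_cons, pvPush_neg hc, hP1]
      · intro x
        rw [hP2]
        constructor
        · rintro ⟨e, he, hxe, hg, hv⟩
          exact ⟨e, List.mem_cons_of_mem _ he, hxe, hg, hv⟩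
        · rintro ⟨e, he, hxe, hg, hv⟩
          rcases List.mem_cons.mp he with rfl | he'
          · exact absurd ⟨hxe ▸ hg, hxe ▸ hv⟩ hc
          · exact ⟨e, he', hxe, hg, hv⟩
      · simp only [List.length_cons]; omega

lemma filter_length_mono' {α : Type} (l : List α) (p q : α → Bool)
    (h : ∀ x, q x = true → p x = true) : (l.filter q).length ≤ (l.filter p).length := by
  induction l with
  | nil => simp
  | cons a l ih =>
    by_cases hq : q a = true
    · rw [List.filter_cons, List.filter_cons, if_pos hq, if_pos (h a hq)]
      simpa using ih
    · rw [List.filter_cons, if_neg hq]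
      by_cases hp : p a = true
      · rw [List.filter_cons, if_pos hp]
        exact Nat.le_succ_of_le ih
      · rw [List.filter_cons, if_neg hp]
        exact ih

lemma filter_length_strict' {α : Type} (l : List α) (p q : α → Bool)
    (h : ∀ x, q x = true → p x = true) (x : α) (hx : x ∈ l) (hpx : p x = true)
    (hqx : q x = false) : (l.filter q).length < (l.filter p).length := by
  induction l with
  | nil => simp at hx
  | cons a l ih =>
    rcases List.mem_cons.mp hx with rfl | hmem
    · rw [List.filter_cons, List.filter_cons, if_pos hpx, if_neg (by simp [hqx])]
      exact Nat.lt_succ_of_le (filter_length_mono' l p q h)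
    · have hlt := ih hmem
      by_cases hq : q a = true
      · rw [List.filter_cons, List.filter_cons, if_pos hq, if_pos (h a hq)]
        simpa using hlt
      · rw [List.filter_cons, if_neg hq]
        by_cases hp : p a = true
        · rw [List.filter_cons, if_pos hp]
          exact Nat.lt_succ_of_lt hlt
        · rw [List.filter_cons, if_neg hp]
          exact hlt
def pvFree (grid : List String) (start : Int × Int) (V : PySem.Set (Int × Int)) : Nat :=
  ((start :: pvCellsList grid).filter (fun c => !(PySem.Set.contains V c))).length

lemma pv_not_contains {α : Type} [BEq α] [LawfulBEq α] (s : PySem.Set α) (x : α) :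
    (!PySem.Set.contains s x) = true ↔ x ∉ s := by
  constructor
  · intro h hmem
    rw [(PySem.Set.contains_iff s x).mpr hmem] at h
    simp at h
  · intro hmem
    cases hc : PySem.Set.contains s x
    · rfl
    · exact absurd ((PySem.Set.contains_iff s x).mp hc) hmem

lemma pvFree_lt {grid : List String} {start pos : Int × Int} {V : PySem.Set (Int × Int)}
    (hu : pos = start ∨ pvGood grid pos) (hv : pos ∉ V) :
    pvFree grid start (PySem.Set.add V pos) < pvFree grid start V := by
  unfold pvFree
  refine filter_length_strict' _ _ _ (fun x hx => ?_) pos ?_ ?_ ?_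
  · rw [pv_not_contains] at hx ⊢
    exact fun hmem => hx ((PySem.Set.mem_add _ _ _).mpr (Or.inl hmem))
  · rcases hu with rfl | hg
    · exact List.mem_cons_self
    · exact List.mem_cons_of_mem _ (mem_pvCellsList.mpr hg.1)
  · rw [pv_not_contains]
    exact hv
  · have hmem : pos ∈ PySem.Set.add V pos := (PySem.Set.mem_add _ _ _).mpr (Or.inr rfl)
    simp [(PySem.Set.contains_iff _ _).mpr hmem]

def InvA (grid : List String) (start : Int × Int) (V : PySem.Set (Int × Int))
    (S : List (Int × Int)) : Prop :=
  (∀ p ∈ S, p = start ∨ pvGood grid p) ∧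
  (∀ p ∈ S, pvReach grid start p) ∧
  (∀ p ∈ V, pvReach grid start p) ∧
  (∀ v ∈ V, ∀ n, pvStep grid v n → n ∈ V ∨ n ∈ S) ∧
  (∀ S₁ q S₂, S = S₁ ++ q :: S₂ → q ∈ V → ∀ n, pvStep grid q n → n ∈ V ∨ n ∈ S₁) ∧
  (start ∈ V ∨ start ∈ S)

lemma propagateLoop_spec (grid : List String) (start : Int × Int) :
    ∀ (fuel : Nat) (V : PySem.Set (Int × Int)) (S : List (Int × Int)),
      InvA grid start V S → S.length + 4 * pvFree grid start V ≤ fuel →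
      (∀ p ∈ V, p ∈ propagateLoop grid fuel V S) ∧
      (∀ p ∈ S, p ∈ propagateLoop grid fuel V S) ∧
      (∀ p ∈ propagateLoop grid fuel V S, pvReach grid start p) ∧
      (∀ v ∈ propagateLoop grid fuel V S, ∀ n, pvStep grid v n → n ∈ propagateLoop grid fuel V S) := by
  intro fuel
  induction fuel with
  | zero =>
    intro V S hInv hμ
    obtain ⟨hS1, hS2, hV, hK, hJ, hst⟩ := hInv
    have hS : S = [] := by
      cases S with
      | nil => rfl
      | cons a t => simp [List.length_cons] at hμ
    subst hS
    refine ⟨fun p hp => hp, by simp, hV, ?_⟩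
    intro v hv n hstep
    rcases hK v hv n hstep with h | h
    · exact h
    · simp at h
  | succ fuel ih =>
    intro V S hInv hμ
    obtain ⟨hS1, hS2, hV, hK, hJ, hst⟩ := hInv
    cases S with
    | nil =>
      refine ⟨fun p hp => hp, by simp, hV, ?_⟩
      intro v hv n hstep
      rcases hK v hv n hstep with h | h
      · exact h
      · simp at h
    | cons pos queue =>
      obtain ⟨P, hP1, hP2, hP3⟩ := foldl_pvPush_exists' grid (PySem.Set.add V pos) pos pvDirs queue
      have hPmem : ∀ x, x ∈ P ↔ pvStep grid pos x ∧ x ∉ PySem.Set.add V pos := by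
        intro x
        rw [hP2]
        constructor
        · rintro ⟨d, hd, hx, hg, hv⟩
          exact ⟨⟨⟨d, hd, hx⟩, hg⟩, hv⟩
        · rintro ⟨⟨⟨d, hd, hx⟩, hg⟩, hv⟩
          exact ⟨d, hd, hx, hg, hv⟩
      have hrun : propagateLoop grid (fuel + 1) V (pos :: queue) =
          propagateLoop grid fuel (PySem.Set.add V pos)
            (pvDirs.foldl (pvPush grid (PySem.Set.add V pos) pos) queue) := rfl
      by_cases hpos : pos ∈ V
      · -- duplicate pop: nothing is pushed
        have hVV : PySem.Set.add V pos = V := PySem.Set.add_of_mem hpos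
        rw [hVV] at hP1 hPmem
        have hPnil : P = [] := by
          rw [List.eq_nil_iff_forall_not_mem]
          intro x hx
          obtain ⟨hstep, hnv⟩ := (hPmem x).mp hx
          rcases hJ [] pos queue rfl hpos x hstep with h | h
          · exact hnv h
          · simp at h
        rw [hrun, hVV, hP1, hPnil, List.nil_append]
        have hInv' : InvA grid start V queue := by
          refine ⟨fun p hp => hS1 p (List.mem_cons_of_mem _ hp),
            fun p hp => hS2 p (List.mem_cons_of_mem _ hp), hV, ?_, ?_, ?_⟩
          · intro v hv n hstep
            rcases hK v hv n hstep with h | h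
            · exact Or.inl h
            · rcases List.mem_cons.mp h with rfl | h'
              · exact Or.inl hpos
              · exact Or.inr h'
          · intro S₁ q S₂ hdec hq n hstep
            rcases hJ (pos :: S₁) q S₂ (by rw [hdec]; rfl) hq n hstep with h | h
            · exact Or.inl h
            · rcases List.mem_cons.mp h with rfl | h'
              · exact Or.inl hpos
              · exact Or.inr h'
          · rcases hst with h | h
            · exact Or.inl h
            · rcases List.mem_cons.mp h with rfl | h'
              · exact Or.inl hpos
              · exact Or.inr h'
        obtain ⟨ihV, ihS, ihsound, ihclosed⟩ := ih V queue hInv' (by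
          simp only [List.length_cons] at hμ; omega)
        refine ⟨ihV, ?_, ihsound, ihclosed⟩
        intro p hp
        rcases List.mem_cons.mp hp with rfl | hp'
        · exact ihV p hpos
        · exact ihS p hp'
      · -- fresh pop
        have hposmem : pos ∈ PySem.Set.add V pos := (PySem.Set.mem_add _ _ _).mpr (Or.inr rfl)
        have hmemV' : ∀ x, x ∈ PySem.Set.add V pos ↔ x ∈ V ∨ x = pos :=
          fun x => PySem.Set.mem_add _ _ _
        have hreachpos : pvReach grid start pos := hS2 pos List.mem_cons_self
        have hInv' : InvA grid start (PySem.Set.add V pos) (P ++ queue) := by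
          refine ⟨?_, ?_, ?_, ?_, ?_, ?_⟩
          · intro p hp
            rcases List.mem_append.mp hp with hp' | hp'
            · exact Or.inr ((hPmem p).mp hp').1.2
            · exact hS1 p (List.mem_cons_of_mem _ hp')
          · intro p hp
            rcases List.mem_append.mp hp with hp' | hp'
            · exact Relation.ReflTransGen.tail hreachpos ((hPmem p).mp hp').1
            · exact hS2 p (List.mem_cons_of_mem _ hp')
          · intro p hp
            rcases (hmemV' p).mp hp with hp' | rfl
            · exact hV p hp'
            · exact hreachpos
          · intro v hv n hstep
            rcases (hmemV' v).mp hv with hv' | rfl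
            · rcases hK v hv' n hstep with h | h
              · exact Or.inl ((hmemV' n).mpr (Or.inl h))
              · rcases List.mem_cons.mp h with rfl | h'
                · exact Or.inl hposmem
                · exact Or.inr (List.mem_append.mpr (Or.inr h'))
            · by_cases hn : n ∈ PySem.Set.add V v
              · exact Or.inl hn
              · exact Or.inr (List.mem_append.mpr (Or.inl ((hPmem n).mpr ⟨hstep, hn⟩)))
          · intro S₁ q S₂ hdec hq n hstep
            rcases List.append_eq_append_iff.mp hdec.symm with ⟨as, hPas, hqs⟩ | ⟨bs, hS1bs, hqueue⟩
            · -- hPas : P = S₁ ++ as, hqs : q :: S₂ = as ++ queue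
              cases as with
              | nil =>
                simp only [List.nil_append] at hqs
                rw [List.append_nil] at hPas
                rcases (hmemV' q).mp hq with hq' | rfl
                · rcases hJ [pos] q S₂ (by rw [← hqs]; rfl) hq' n hstep with h | h
                  · exact Or.inl ((hmemV' n).mpr (Or.inl h))
                  · rcases List.mem_cons.mp h with rfl | h'
                    · exact Or.inl hposmem
                    · simp at h'
                · by_cases hn : n ∈ PySem.Set.add V q
                  · exact Or.inl hn
                  · refine Or.inr ?_
                    rw [← hPas]
                    exact (hPmem n).mpr ⟨hstep, hn⟩
              | cons b as' =>
                have hqP : q ∈ P := by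
                  have hqb : q = b := by
                    have := congrArg (fun l => l.head?) hqs
                    simpa using this
                  rw [hPas, hqb]
                  exact List.mem_append.mpr (Or.inr List.mem_cons_self)
                exact absurd hq ((hPmem q).mp hqP).2
            · -- hS1bs : S₁ = P ++ bs, hqueue : queue = bs ++ q :: S₂
              rcases (hmemV' q).mp hq with hq' | rfl
              · rcases hJ (pos :: bs) q S₂ (by rw [hqueue]; rfl) hq' n hstep with h | h
                · exact Or.inl ((hmemV' n).mpr (Or.inl h))
                · rcases List.mem_cons.mp h with rfl | h'
                  · exact Or.inl hposmem
                  · exact Or.inr (by rw [hS1bs]; exact List.mem_append.mpr (Or.inr h'))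
              · by_cases hn : n ∈ PySem.Set.add V q
                · exact Or.inl hn
                · refine Or.inr ?_
                  rw [hS1bs]
                  exact List.mem_append.mpr (Or.inl ((hPmem n).mpr ⟨hstep, hn⟩))
          · rcases hst with h | h
            · exact Or.inl ((hmemV' start).mpr (Or.inl h))
            · rcases List.mem_cons.mp h with rfl | h'
              · exact Or.inl hposmem
              · exact Or.inr (List.mem_append.mpr (Or.inr h'))
        have hμ' : (P ++ queue).length + 4 * pvFree grid start (PySem.Set.add V pos) ≤ fuel := by
          have hfree : pvFree grid start (PySem.Set.add V pos) < pvFree grid start V :=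
            pvFree_lt (hS1 pos List.mem_cons_self) hpos
          have hdirs : pvDirs.length = 4 := rfl
          rw [List.length_append]
          simp only [List.length_cons] at hμ
          omega
        obtain ⟨ihV, ihS, ihsound, ihclosed⟩ := ih (PySem.Set.add V pos) (P ++ queue) hInv' hμ'
        rw [hrun, hP1]
        refine ⟨?_, ?_, ihsound, ihclosed⟩
        · intro p hp
          exact ihV p ((hmemV' p).mpr (Or.inl hp))
        · intro p hp
          rcases List.mem_cons.mp hp with rfl | hp'
          · exact ihV p hposmem
          · exact ihS p (List.mem_append.mpr (Or.inr hp'))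
lemma propagate_mem_iff (grid : List String) (start q : Int × Int) :
    q ∈ propagate grid start ↔ pvReach grid start q := by
  unfold propagate
  have hInv : InvA grid start PySem.Set.empty [start] := by
    refine ⟨?_, ?_, ?_, ?_, ?_, ?_⟩
    · intro p hp
      simp only [List.mem_singleton] at hp
      exact Or.inl hp
    · intro p hp
      simp only [List.mem_singleton] at hp
      subst hp
      exact Relation.ReflTransGen.refl
    · intro p hp; simp [PySem.Set.empty] at hp
    · intro v hv; simp [PySem.Set.empty] at hv
    · intro S₁ qq S₂ hdec hq; simp [PySem.Set.empty] at hq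
    · exact Or.inr List.mem_cons_self
  have hfree : pvFree grid start PySem.Set.empty ≤ 1 + (pvCellsList grid).length := by
    have h := List.length_filter_le (fun c => !(PySem.Set.contains PySem.Set.empty c))
      (start :: pvCellsList grid)
    simpa [pvFree] using h
  obtain ⟨hV, hS, hsound, hclosed⟩ := propagateLoop_spec grid start
    (5 + 4 * (pvCellsList grid).length) PySem.Set.empty [start] hInv (by
      simp only [List.length_singleton]; omega)
  constructor
  · exact fun h => hsound q h
  · intro h
    induction h with
    | refl => exact hS start List.mem_cons_self
    | tail h1 h2 ih => exact hclosed _ ih _ h2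
lemma mem_foldl_add_pairs (p : Int × Int) (x : Int × Int) :
    ∀ (ds : List (Int × Int)) (s0 : PySem.Set (Int × Int)),
      (x ∈ ds.foldl (fun s d => PySem.Set.add s (p.1 + d.1, p.2 + d.2)) s0) ↔
        x ∈ s0 ∨ ∃ d ∈ ds, x = (p.1 + d.1, p.2 + d.2) := by
  intro ds
  induction ds with
  | nil => simp
  | cons d ds ih =>
    intro s0
    rw [List.foldl_cons, ih, PySem.Set.mem_add]
    constructor
    · rintro ((h | h) | ⟨e, he, hx⟩)
      · exact Or.inl h
      · exact Or.inr ⟨d, List.mem_cons_self, h⟩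
      · exact Or.inr ⟨e, List.mem_cons_of_mem _ he, hx⟩
    · rintro (h | ⟨e, he, hx⟩)
      · exact Or.inl (Or.inl h)
      · rcases List.mem_cons.mp he with rfl | he'
        · exact Or.inl (Or.inr hx)
        · exact Or.inr ⟨e, he', hx⟩

lemma mem_pvNeighborsB {F : PySem.Set (Int × Int)} {x : Int × Int} :
    x ∈ pvNeighborsB F ↔ ∃ p ∈ F, pvAdj p x := by
  unfold pvNeighborsB
  suffices h : ∀ (l : List (Int × Int)) (s0 : PySem.Set (Int × Int)),
      (x ∈ l.foldl (fun s p => pvDirs.foldl (fun s d => PySem.Set.add s (p.1 + d.1, p.2 + d.2)) s) s0) ↔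
        x ∈ s0 ∨ ∃ p ∈ l, pvAdj p x by
    rw [h]
    simp [PySem.Set.empty]
  intro l
  induction l with
  | nil => simp
  | cons p l ih =>
    intro s0
    rw [List.foldl_cons, ih, mem_foldl_add_pairs]
    unfold pvAdj
    constructor
    · rintro ((h | ⟨d, hd, hx⟩) | ⟨e, he, hadj⟩)
      · exact Or.inl h
      · exact Or.inr ⟨p, List.mem_cons_self, d, hd, hx⟩
      · exact Or.inr ⟨e, List.mem_cons_of_mem _ he, hadj⟩
    · rintro (h | ⟨e, he, hadj⟩)
      · exact Or.inl (Or.inl h)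
      · rcases List.mem_cons.mp he with rfl | he'
        · exact Or.inl (Or.inr hadj)
        · exact Or.inr ⟨e, he', hadj⟩

def pvFreeB (grid : List String) (V : PySem.Set (Int × Int)) : Nat :=
  ((pvCellsList grid).filter (fun c => !(PySem.Set.contains V c))).length

def InvB (grid : List String) (start : Int × Int) (V F : PySem.Set (Int × Int)) : Prop :=
  (∀ p ∈ F, p ∈ V) ∧ (start ∈ V) ∧ (∀ p ∈ V, pvReach grid start p) ∧
  (∀ v ∈ V, v ∉ F → ∀ n, pvStep grid v n → n ∈ V)
lemma bfsLoop_spec (grid : List String) (start : Int × Int) :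
    ∀ (fuel : Nat) (V F : PySem.Set (Int × Int)),
      InvB grid start V F → 1 + (if F = [] then 0 else 1 + pvFreeB grid V) ≤ fuel →
      (∀ p ∈ V, p ∈ bfsLoop grid fuel V F) ∧
      (∀ p ∈ bfsLoop grid fuel V F, pvReach grid start p) ∧
      (∀ v ∈ bfsLoop grid fuel V F, ∀ n, pvStep grid v n → n ∈ bfsLoop grid fuel V F) := by
  intro fuel
  induction fuel with
  | zero =>
    intro V F hInv hmu
    split_ifs at hmu <;> omega
  | succ fuel ih =>
    intro V F hInv hmu
    obtain ⟨hFV, hstart, hreach, hclosed⟩ := hInv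
    by_cases hF : F = []
    · have hrun : bfsLoop grid (fuel + 1) V F = V := by
        simp [bfsLoop, hF]
      rw [hrun]
      refine ⟨fun p hp => hp, hreach, ?_⟩
      intro v hv n hstep
      exact hclosed v hv (by simp [hF]) n hstep
    · have hrun : bfsLoop grid (fuel + 1) V F =
          bfsLoop grid fuel
            (PySem.Set.union V ((pvNeighborsB F).filter
              (fun p => pvIsOpen grid p && !(PySem.Set.contains V p))))
            ((pvNeighborsB F).filter (fun p => pvIsOpen grid p && !(PySem.Set.contains V p))) := by
        simp only [bfsLoop]
        rw [if_neg (by simp [List.isEmpty_iff, hF])]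
      set nextF := (pvNeighborsB F).filter (fun p => pvIsOpen grid p && !(PySem.Set.contains V p))
        with hnextdef
      have hnextmem : ∀ x, x ∈ nextF ↔ (∃ p ∈ F, pvAdj p x) ∧ pvGood grid x ∧ x ∉ V := by
        intro x
        rw [hnextdef, List.mem_filter, mem_pvNeighborsB]
        constructor
        · rintro ⟨h1, h2⟩
          rw [Bool.and_eq_true] at h2
          exact ⟨h1, pvIsOpen_iff.mp h2.1, (pv_not_contains _ _).mp h2.2⟩
        · rintro ⟨h1, h2, h3⟩
          refine ⟨h1, ?_⟩
          rw [Bool.and_eq_true]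
          exact ⟨pvIsOpen_iff.mpr h2, (pv_not_contains _ _).mpr h3⟩
      have hInv' : InvB grid start (PySem.Set.union V nextF) nextF := by
        refine ⟨fun p hp => (PySem.Set.mem_union _ _ _).mpr (Or.inr hp),
          (PySem.Set.mem_union _ _ _).mpr (Or.inl hstart), ?_, ?_⟩
        · intro p hp
          rcases (PySem.Set.mem_union _ _ _).mp hp with h | h
          · exact hreach p h
          · obtain ⟨⟨f, hf, hadj⟩, hg, hnv⟩ := (hnextmem p).mp h
            exact Relation.ReflTransGen.tail (hreach f (hFV f hf)) ⟨hadj, hg⟩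
        · intro v hv hvnF n hstep
          rcases (PySem.Set.mem_union _ _ _).mp hv with hvV | hvN
          · by_cases hvF : v ∈ F
            · by_cases hnV : n ∈ V
              · exact (PySem.Set.mem_union _ _ _).mpr (Or.inl hnV)
              · exact (PySem.Set.mem_union _ _ _).mpr (Or.inr ((hnextmem n).mpr
                  ⟨⟨v, hvF, hstep.1⟩, hstep.2, hnV⟩))
            · exact (PySem.Set.mem_union _ _ _).mpr (Or.inl (hclosed v hvV hvF n hstep))
          · exact absurd hvN hvnF
      have hmu' : 1 + (if nextF = [] then 0 else 1 + pvFreeB grid (PySem.Set.union V nextF)) ≤ fuel := by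
        rw [if_neg hF] at hmu
        by_cases hnil : nextF = []
        · rw [if_pos hnil]; omega
        · rw [if_neg hnil]
          have hmono : ∀ x, (!(PySem.Set.contains (PySem.Set.union V nextF) x)) = true →
              (!(PySem.Set.contains V x)) = true := by
            intro x hx
            rw [pv_not_contains] at hx ⊢
            exact fun hm => hx ((PySem.Set.mem_union _ _ _).mpr (Or.inl hm))
          obtain ⟨x, hx⟩ := List.exists_mem_of_ne_nil nextF hnil
          obtain ⟨hadj, hg, hnv⟩ := (hnextmem x).mp hx
          have hstrict : pvFreeB grid (PySem.Set.union V nextF) < pvFreeB grid V := by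
            refine filter_length_strict' _ _ _ hmono x (mem_pvCellsList.mpr hg.1)
              ((pv_not_contains _ _).mpr hnv) ?_
            have hxm : x ∈ PySem.Set.union V nextF := (PySem.Set.mem_union _ _ _).mpr (Or.inr hx)
            show (!(PySem.Set.contains (PySem.Set.union V nextF) x)) = false
            rw [(PySem.Set.contains_iff _ _).mpr hxm]
            rfl
          omega
      obtain ⟨ihV, ihsound, ihclosed⟩ := ih (PySem.Set.union V nextF) nextF hInv' hmu'
      rw [hrun]
      exact ⟨fun p hp => ihV p ((PySem.Set.mem_union _ _ _).mpr (Or.inl hp)), ihsound, ihclosed⟩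

lemma bfs_mem_iff (grid : List String) (start q : Int × Int) :
    q ∈ bfsLoop grid (2 + (pvCellsList grid).length)
        (PySem.Set.add PySem.Set.empty start) (PySem.Set.add PySem.Set.empty start) ↔
      pvReach grid start q := by
  have hsingle : PySem.Set.add PySem.Set.empty start = [start] := rfl
  have hInv : InvB grid start (PySem.Set.add PySem.Set.empty start)
      (PySem.Set.add PySem.Set.empty start) := by
    refine ⟨fun p hp => hp, (PySem.Set.mem_add _ _ _).mpr (Or.inr rfl), ?_, ?_⟩
    · intro p hp
      rcases (PySem.Set.mem_add _ _ _).mp hp with h | rfl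
      · simp [PySem.Set.empty] at h
      · exact Relation.ReflTransGen.refl
    · intro v hv hvnF
      exact absurd hv hvnF
  have hfree : pvFreeB grid [start] ≤ (pvCellsList grid).length :=
    List.length_filter_le _ _
  obtain ⟨hV, hsound, hclosed⟩ := bfsLoop_spec grid start (2 + (pvCellsList grid).length)
    (PySem.Set.add PySem.Set.empty start) (PySem.Set.add PySem.Set.empty start) hInv (by
      rw [hsingle, if_neg (by simp)]
      omega)
  constructor
  · exact fun h => hsound q h
  · intro h
    induction h with
    | refl => exact hV start ((PySem.Set.mem_add _ _ _).mpr (Or.inr rfl))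
    | tail h1 h2 ih2 => exact hclosed _ ih2 _ h2

-- render congruence: the rendered rows depend only on membership in the filled set
lemma render_eq {fillerA : String} {A B : PySem.Set (Int × Int)}
    (h : ∀ q, q ∈ A ↔ q ∈ B) (r : Int) (line : String) :
    pvRenderRowA fillerA A r line = pvRenderRowB fillerA B r line := by
  unfold pvRenderRowA pvRenderRowB
  congr 1
  apply List.map_congr_left
  intro ce _
  have hc : PySem.Set.contains A (r, ce.1) = PySem.Set.contains B (r, ce.1) := by
    rw [Bool.eq_iff_iff, PySem.Set.contains_iff, PySem.Set.contains_iff]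
    exact h _
  rw [hc]

-- ===== VERDICT (by name: the statement is the Claim_ definition above) =====
theorem fill_holes_spec : Claim_equal_fill_holes := by
  intro grid start_pos filler _ _
  show fill_holes grid start_pos filler = fill_holes_alt grid start_pos filler
  unfold fill_holes fill_holes_alt
  apply List.map_congr_left
  intro rl _
  exact render_eq (fun q => by rw [propagate_mem_iff, bfs_mem_iff]) rl.1 rl.2
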